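-- pv_equiv track=rewrite | github.com/jmin123/coding-problem-repo | banned_user_filter.py | solution
-- ===== SOURCE A (Python) =====
-- from itertools import product
--
-- def is_match(user, banned):
--     if len(user) != len(banned):
--         return False
--     for u, b in zip(user, banned):
--         if b != '*' and u != b:
--             return False
--     return True
--
-- def solution(user_id, banned_id):
--     # 1. 각 불량 사용자 ID와 일치하는 실제 사용자 ID 찾기
--     matched_users = []
--     for banned in banned_id:
--         matched = [user for user in user_id if is_match(user, banned)]
--         matched_users.append(matched)
--
--     # 2. 가능한 모든 조합 만들기
--     all_combinations = product(*matched_users)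
--     # 3. 중복 제거 및 유효한 조합 세기
--     valid_combinations = set()
--     for combo in all_combinations:
--         if len(set(combo)) == len(banned_id):  # 중복된 사용자가 없는 경우만
--             valid_combinations.add(tuple(sorted(combo)))
--
--     return len(valid_combinations)
-- ===== SOURCE B (Python) =====
-- def is_match(user, banned):
--     return len(user) == len(banned) and all(b == '*' or u == b for u, b in zip(user, banned))
--
-- def solution(user_id, banned_id):
--     # build valid (duplicate-free) assignments level by level, pruning reused users early
--     combos = [[]]
--     for banned in banned_id:
--         matched = [u for u in user_id if is_match(u, banned)]
--         combos = [c + [u] for c in combos for u in matched if u not in c]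
--     seen = set()
--     for c in combos:
--         seen.add(tuple(sorted(c)))
--     return len(seen)
-- ===== Notes on version B (the rewrite author's own statement) =====
-- stated objective: faster
-- what changed: B builds assignments level by level over the banned patterns, pruning any partial combination that reuses a user as soon as it arises, instead of A's materialising the full cartesian product of all match lists and filtering/deduplicating whole tuples at the end; intended as faster (probe: A timed out at n=16 where B returned; no clean ratio measurable).
import Mathlib
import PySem

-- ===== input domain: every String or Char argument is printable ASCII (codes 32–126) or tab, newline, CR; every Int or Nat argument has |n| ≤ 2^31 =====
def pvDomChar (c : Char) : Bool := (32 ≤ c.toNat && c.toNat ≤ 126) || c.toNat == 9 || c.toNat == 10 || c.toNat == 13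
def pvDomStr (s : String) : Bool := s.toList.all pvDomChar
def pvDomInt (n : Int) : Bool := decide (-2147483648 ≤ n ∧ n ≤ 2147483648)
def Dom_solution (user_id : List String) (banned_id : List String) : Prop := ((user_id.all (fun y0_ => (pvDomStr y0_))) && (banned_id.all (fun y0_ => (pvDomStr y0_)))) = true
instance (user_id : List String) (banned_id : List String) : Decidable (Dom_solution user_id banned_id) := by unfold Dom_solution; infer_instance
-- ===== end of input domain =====

-- B replaces A's full cartesian product + whole-tuple duplicate filter by level-by-level
-- building that prunes combinations reusing a user as soon as they arise (intended as faster;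
-- timing run: A timed out at n=16 where B still returned, no clean ratio measurable).

-- ===== PORT A =====
-- is_match's early-return loop over zip(user, banned)
def isMatchLoop : List (Char × Char) → Bool
  | [] => true
  | (u, b) :: rest => if b != '*' && u != b then false else isMatchLoop rest

def isMatch (user banned : String) : Bool :=
  if user.toList.length != banned.toList.length then false
  else isMatchLoop (user.toList.zip banned.toList)

-- itertools.product(*lists): hand port, exact (tuples in product order, last factor fastest)
def pyProduct : List (List String) → List (List String)
  | [] => [[]]
  | xs :: rest => xs.flatMap (fun x => (pyProduct rest).map (fun t => x :: t))

def solution (user_id : List String) (banned_id : List String) : Int :=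
  let matched_users := banned_id.foldl
    (fun acc banned => acc ++ [user_id.filter (fun user => isMatch user banned)]) []
  let valid_combinations : PySem.Set (List String) := (pyProduct matched_users).foldl
    (fun s combo =>
      if (PySem.Set.ofList combo).length == banned_id.length then
        PySem.Set.add s (PySem.List.sorted combo (fun x => x) false)
      else s) []
  (valid_combinations.length : Int)

-- ===== PORT B =====
def isMatchB (user banned : String) : Bool :=
  user.toList.length == banned.toList.length &&
  (user.toList.zip banned.toList).all (fun ub => ub.2 == '*' || ub.1 == ub.2)

-- [c + [u] for c in combos for u in matched if u not in c]
def stepB (combos : List (List String)) (matched : List String) : List (List String) :=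
  combos.flatMap (fun c => (matched.filter (fun u => !(c.contains u))).map (fun u => c ++ [u]))

def solution_alt (user_id : List String) (banned_id : List String) : Int :=
  let combos := banned_id.foldl
    (fun combos banned => stepB combos (user_id.filter (fun u => isMatchB u banned))) [[]]
  let seen : PySem.Set (List String) := combos.foldl
    (fun s c => PySem.Set.add s (PySem.List.sorted c (fun x => x) false)) []
  (seen.length : Int)

-- ===== PRECONDITION & SPEC =====
def Spec_solution (user_id : List String) (banned_id : List String) (out : Int) : Prop := out = solution_alt user_id banned_id
instance (user_id : List String) (banned_id : List String) (out : Int) : Decidable (Spec_solution user_id banned_id out) := by unfold Spec_solution; infer_instance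

-- ===== CLAIM (what is proved, stated in full; the proofs are below) =====
def Claim_equal_solution : Prop := ∀ (user_id : List String) (banned_id : List String), Dom_solution user_id banned_id → Spec_solution user_id banned_id (solution user_id banned_id)

-- ===== LEMMAS AND PROOFS =====

-- the two matchers agree
lemma isMatchLoop_eq_all (l : List (Char × Char)) :
    isMatchLoop l = l.all (fun ub => ub.2 == '*' || ub.1 == ub.2) := by
  induction l with
  | nil => rfl
  | cons hd tl ih =>
    obtain ⟨u, b⟩ := hd
    simp only [isMatchLoop, List.all_cons, ih]
    by_cases hb : b = '*' <;> by_cases hu : u = b <;> simp [hb, hu]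

lemma isMatch_eq (user banned : String) : isMatch user banned = isMatchB user banned := by
  unfold isMatch isMatchB
  by_cases h : user.toList.length = banned.toList.length <;>
    simp [h, isMatchLoop_eq_all, Bool.beq_eq_decide_eq]

-- "can extend the prefix c by the elements of t, never reusing one"
def distinctFrom (c : List String) : List String → Bool
  | [] => true
  | x :: t => !(c.contains x) && distinctFrom (c ++ [x]) t

lemma distinctFrom_iff (t : List String) : ∀ c, distinctFrom c t = true ↔ t.Nodup ∧ ∀ x ∈ t, x ∉ c := by
  induction t with
  | nil => simp [distinctFrom]
  | cons x t ih =>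
    intro c
    rw [distinctFrom, Bool.and_eq_true, ih]
    simp only [Bool.not_eq_true', List.contains_eq_mem, decide_eq_false_iff_not,
      List.nodup_cons, List.mem_append, List.mem_cons,
      List.not_mem_nil]
    constructor
    · rintro ⟨hx, hnd, h⟩
      refine ⟨⟨fun hxt => h x hxt (Or.inr (Or.inl rfl)), hnd⟩, ?_⟩
      rintro y (rfl | hy)
      · exact hx
      · exact fun hyc => h y hy (Or.inl hyc)
    · rintro ⟨⟨hxt, hnd⟩, h⟩
      refine ⟨h x (Or.inl rfl), hnd, fun y hy hmem => ?_⟩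
      rcases hmem with hyc | rfl | h0
      · exact h y (Or.inr hy) hyc
      · exact hxt hy
      · exact h0

lemma distinctFrom_nil (t : List String) : distinctFrom [] t = decide t.Nodup := by
  rw [Bool.eq_iff_iff, distinctFrom_iff, decide_eq_true_iff]
  simp

-- the iterated pruning step enumerates exactly the duplicate-free product extensions
lemma foldl_stepB (ms : List (List String)) : ∀ combos : List (List String),
    ms.foldl stepB combos
      = combos.flatMap (fun c => ((pyProduct ms).filter (fun t => distinctFrom c t)).map (fun t => c ++ t)) := by
  induction ms with
  | nil =>
    intro combos
    simp [pyProduct, distinctFrom]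
  | cons xs rest ih =>
    intro combos
    have inner : ∀ c : List String,
        ((xs.filter (fun u => !(c.contains u))).map (fun u => c ++ [u])).flatMap
            (fun c' => ((pyProduct rest).filter (fun t => distinctFrom c' t)).map (fun t => c' ++ t))
          = ((xs.flatMap (fun x => (pyProduct rest).map (fun t => x :: t))).filter
              (fun t => distinctFrom c t)).map (fun t => c ++ t) := by
      intro c
      induction xs with
      | nil => rfl
      | cons x xs ihx =>
        by_cases hx : c.contains x = true
        · simp only [List.flatMap_cons, List.filter_cons, List.filter_append, List.map_append,
            hx, Bool.not_true, Bool.false_eq_true, if_false, ihx]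
          have : ((pyProduct rest).map (fun t => x :: t)).filter (fun t => distinctFrom c t) = [] := by
            rw [List.filter_map]
            have : (pyProduct rest).filter ((fun t => distinctFrom c t) ∘ fun t => x :: t) = [] := by
              apply List.filter_eq_nil_iff.mpr
              intro t _
              simp [Function.comp, distinctFrom]
              intro hxc
              exact absurd (by simpa using hx) hxc
            rw [this, List.map_nil]
          simp [this]
        · simp only [Bool.not_eq_true] at hx
          simp only [List.flatMap_cons, List.filter_cons, List.filter_append, List.map_append,
            hx, Bool.not_false, if_true, List.map_cons, List.flatMap_cons, ihx]
          congr 1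
          have hfm : ((pyProduct rest).map (fun t => x :: t)).filter (fun t => distinctFrom c t)
              = ((pyProduct rest).filter (fun t => distinctFrom (c ++ [x]) t)).map (fun t => x :: t) := by
            rw [List.filter_map]
            congr 1
            apply List.filter_congr
            intro t _
            simp only [Function.comp, distinctFrom, hx, Bool.not_false, Bool.true_and]
          rw [hfm, List.map_map]
          apply List.map_congr_left
          intro t _
          simp
    calc (xs :: rest).foldl stepB combos
        = rest.foldl stepB (stepB combos xs) := rfl
      _ = (stepB combos xs).flatMap
            (fun c => ((pyProduct rest).filter (fun t => distinctFrom c t)).map (fun t => c ++ t)) := ih _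
      _ = combos.flatMap (fun c => ((pyProduct (xs :: rest)).filter (fun t => distinctFrom c t)).map (fun t => c ++ t)) := by
          unfold stepB
          rw [List.flatMap_assoc]
          congr 1
          funext c
          exact inner c

-- every tuple of the product has one entry per factor
lemma mem_pyProduct_length : ∀ (ms : List (List String)) (c : List String), c ∈ pyProduct ms → c.length = ms.length := by
  intro ms
  induction ms with
  | nil => intro c hc; simp [pyProduct] at hc; simp [hc]
  | cons xs rest ih =>
    intro c hc
    simp only [pyProduct, List.mem_flatMap, List.mem_map] at hc
    obtain ⟨x, _, t, ht, rfl⟩ := hc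
    simp [ih t ht]

-- size of a Python set of the elements of c
lemma foldl_add_length_le (c : List String) : ∀ s : List String,
    (c.foldl PySem.Set.add s).length ≤ s.length + c.length := by
  induction c with
  | nil => intro s; simp
  | cons x c ih =>
    intro s
    simp only [List.foldl_cons]
    refine le_trans (ih _) ?_
    unfold PySem.Set.add
    split <;> simp <;> omega

lemma foldl_add_of_nodup (c : List String) : ∀ s : List String, (s ++ c).Nodup →
    c.foldl PySem.Set.add s = s ++ c := by
  induction c with
  | nil => intro s _; simp
  | cons x c ih =>
    intro s hnd
    have hxs : x ∉ s := by
      intro hx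
      exact (List.disjoint_of_nodup_append hnd) hx (by simp)
    have : PySem.Set.add s x = s ++ [x] := by
      unfold PySem.Set.add
      simp [PySem.Set.contains, hxs]
    simp only [List.foldl_cons, this]
    rw [ih (s ++ [x]) (by simpa using hnd)]
    simp

lemma foldl_add_lt_of_not_nodup (c : List String) : ∀ s : List String, s.Nodup → ¬ (s ++ c).Nodup →
    (c.foldl PySem.Set.add s).length < s.length + c.length := by
  induction c with
  | nil => intro s hs hnd; simp at hnd; exact absurd hs hnd
  | cons x c ih =>
    intro s hs hnd
    by_cases hxs : x ∈ s
    · have : PySem.Set.add s x = s := by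
        unfold PySem.Set.add
        simp [PySem.Set.contains, hxs]
      simp only [List.foldl_cons, this]
      have := foldl_add_length_le c s
      simp only [List.length_cons]
      omega
    · have hadd : PySem.Set.add s x = s ++ [x] := by
        unfold PySem.Set.add
        simp [PySem.Set.contains, hxs]
      have hnd' : ¬ ((s ++ [x]) ++ c).Nodup := by
        intro h; apply hnd; simpa using h
      have hs' : (s ++ [x]).Nodup := by
        simp [List.nodup_append, hs]
        exact fun a ha h => hxs (h ▸ ha)
      simp only [List.foldl_cons, hadd]
      have := ih (s ++ [x]) hs' hnd'
      simp only [List.length_append, List.length_cons, List.length_nil] at this ⊢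
      omega

lemma ofList_length_eq_iff (c : List String) :
    ((PySem.Set.ofList c).length == c.length) = decide c.Nodup := by
  rw [Bool.eq_iff_iff, beq_iff_eq, decide_eq_true_iff]
  have hofl : PySem.Set.ofList c = c.foldl PySem.Set.add [] := PySem.Set.ofList_eq_foldl c
  constructor
  · intro h
    by_contra hnd
    have := foldl_add_lt_of_not_nodup c [] (by simp) (by simpa using hnd)
    rw [← hofl] at this
    simp at this
    omega
  · intro hnd
    rw [hofl, foldl_add_of_nodup c [] (by simpa using hnd)]
    simp

-- an 'if p then s.add … else s' loop is the plain loop over the filtered list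
lemma foldl_add_if {α β : Type} (p : α → Bool) (g : β → α → β) (l : List α) :
    ∀ s : β, l.foldl (fun s c => if p c then g s c else s) s = (l.filter p).foldl g s := by
  induction l with
  | nil => intro s; rfl
  | cons x l ih =>
    intro s
    by_cases hx : p x = true <;> simp [hx, ih]

lemma foldl_append_singleton (l : List String) (f : String → List String) :
    ∀ acc, l.foldl (fun acc b => acc ++ [f b]) acc = acc ++ l.map f := by
  induction l with
  | nil => intro acc; simp
  | cons x l ih => intro acc; simp [ih]

-- ===== VERDICT (by name: the statement is the Claim_ definition above) =====
theorem solution_spec : Claim_equal_solution := by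
  intro user_id banned_id _
  have hfil : (fun banned => user_id.filter (fun user => isMatch user banned))
      = (fun banned => user_id.filter (fun u => isMatchB u banned)) := by
    funext banned
    exact List.filter_congr (fun u _ => by rw [isMatch_eq])
  have hB : banned_id.foldl (fun combos banned => stepB combos (user_id.filter (fun u => isMatchB u banned))) [[]]
      = (pyProduct (banned_id.map (fun banned => user_id.filter (fun u => isMatchB u banned)))).filter
          (fun t => distinctFrom [] t) := by
    rw [← List.foldl_map, foldl_stepB]
    simp
  have hA : (pyProduct (banned_id.map (fun banned => user_id.filter (fun u => isMatchB u banned)))).foldl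
      (fun s combo => if (PySem.Set.ofList combo).length == banned_id.length then
        PySem.Set.add s (PySem.List.sorted combo (fun x => x) false) else s) []
      = ((pyProduct (banned_id.map (fun banned => user_id.filter (fun u => isMatchB u banned)))).filter
          (fun t => distinctFrom [] t)).foldl
          (fun s c => PySem.Set.add s (PySem.List.sorted c (fun x => x) false)) [] := by
    rw [foldl_add_if]
    congr 1
    apply List.filter_congr
    intro c hc
    have hlen : c.length = banned_id.length := by
      rw [mem_pyProduct_length _ c hc, List.length_map]
    rw [← hlen, ofList_length_eq_iff, distinctFrom_nil]
  show Spec_solution _ _ _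
  unfold Spec_solution solution solution_alt
  simp only [foldl_append_singleton, List.nil_append, hfil, hB, hA]
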